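-- pv_equiv track=rewrite | github.com/zigzagzeeq/AutoRobot | robot/speech_robot.py | respond_to_emotion
-- ===== SOURCE A (Python) =====
-- def respond_to_emotion(emotion_dict):
--     """
--     Generate a response based on the detected emotions.
--     If there is a tie, respond with mixed emotions.
--     If neutral is the highest, ignore it and focus on other emotions.
--     """
--     # dictionary preprocessing
--     # Remove neutral if it exists
--     if 'neutral' in emotion_dict:
--         del emotion_dict['neutral']
--
--     # If no emotions left after removing neutral
--     if not emotion_dict:
--         return "No emotion detected.", False
--
--     # Find the list of emotions with highest frequency
--     # Sort emotions by frequency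
--     sorted_emotions = sorted(emotion_dict.items(), key=lambda x: x[1], reverse=True)
--     highest_freq = sorted_emotions[0][1]
--
--     # Check for ties
--     tied_emotions = [emotion for emotion in sorted_emotions if emotion[1] == highest_freq]
--
--     if len(tied_emotions) > 1:
--         response = "I feel like you all are feeling mixed emotions like " + ", ".join([emotion[0] for emotion in tied_emotions])
--
--     else:
--         response = "I can detect most of you here are feeling " + tied_emotions[0][0] +". "
--
--     response += "What made you feel that way? Please tell me in a few words."
--     return response, True
-- ===== SOURCE B (Python) =====
-- def respond_to_emotion(emotion_dict):
--     """Single pass: track the best count and the tied names as we go (no sort)."""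
--     emotion_dict.pop('neutral', None)
--     if not emotion_dict:
--         return "No emotion detected.", False
--     best = None
--     tied = []
--     for name, count in emotion_dict.items():
--         if best is None or count > best:
--             best = count
--             tied = [name]
--         elif count == best:
--             tied.append(name)
--     if len(tied) > 1:
--         response = "I feel like you all are feeling mixed emotions like " + ", ".join(tied)
--     else:
--         response = "I can detect most of you here are feeling " + tied[0] + ". "
--     response += "What made you feel that way? Please tell me in a few words."
--     return response, True
-- ===== Notes on version B (the rewrite author's own statement) =====
-- stated objective: faster
-- what changed: B replaces A's stable descending sort plus head-read and rescan for ties by a single left-to-right pass keeping the current best count and the list of tied names.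
import Mathlib
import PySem

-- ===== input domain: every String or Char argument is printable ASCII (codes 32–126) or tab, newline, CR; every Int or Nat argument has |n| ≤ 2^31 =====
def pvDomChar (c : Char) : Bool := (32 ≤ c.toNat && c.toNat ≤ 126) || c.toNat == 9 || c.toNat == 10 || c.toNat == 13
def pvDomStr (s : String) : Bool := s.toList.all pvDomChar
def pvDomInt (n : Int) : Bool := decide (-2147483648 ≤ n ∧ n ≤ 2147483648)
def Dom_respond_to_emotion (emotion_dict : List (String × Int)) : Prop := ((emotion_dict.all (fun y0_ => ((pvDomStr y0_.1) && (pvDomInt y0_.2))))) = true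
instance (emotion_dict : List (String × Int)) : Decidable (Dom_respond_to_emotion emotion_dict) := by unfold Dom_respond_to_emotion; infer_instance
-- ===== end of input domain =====

-- B replaces A's stable descending sort + rescan by a single left-to-right pass keeping the best
-- count and the tied names (both, like A, mutate the argument in Python by popping 'neutral';
-- the equivalence proved here is about the return value, and B performs the same mutation).


-- ===== PORT A =====
def respond_to_emotion (emotion_dict : List (String × Int)) : String × Bool :=
  -- del emotion_dict['neutral'] (dict as assoc list with distinct keys)
  let d := emotion_dict.filter (fun p => !(p.1 == "neutral"))
  if d = [] then ("No emotion detected.", false)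
  else
    let sorted_emotions := PySem.List.sorted d (fun x => x.2) true
    let highest_freq := (PySem.List.pyGetD sorted_emotions 0 ("", 0)).2
    let tied_emotions := sorted_emotions.filter (fun e => e.2 == highest_freq)
    let response :=
      if tied_emotions.length > 1 then
        "I feel like you all are feeling mixed emotions like " ++
          PySem.Str.join ", " (tied_emotions.map (fun e => e.1))
      else
        "I can detect most of you here are feeling " ++
          (PySem.List.pyGetD tied_emotions 0 ("", 0)).1 ++ ". "
    (response ++ "What made you feel that way? Please tell me in a few words.", true)

-- ===== PORT B =====
-- one step of B's loop: update (best, tied) with the next (name, count)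
def rteStep (st : Option Int × List String) (nc : String × Int) : Option Int × List String :=
  match st with
  | (none, _) => (some nc.2, [nc.1])
  | (some b, tied) =>
    if nc.2 > b then (some nc.2, [nc.1])
    else if nc.2 == b then (some b, tied ++ [nc.1])
    else (some b, tied)

def respond_to_emotion_alt (emotion_dict : List (String × Int)) : String × Bool :=
  let d := emotion_dict.filter (fun p => !(p.1 == "neutral"))
  if d = [] then ("No emotion detected.", false)
  else
    let tied := (d.foldl rteStep (none, [])).2
    let response :=
      if tied.length > 1 then
        "I feel like you all are feeling mixed emotions like " ++ PySem.Str.join ", " tied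
      else
        "I can detect most of you here are feeling " ++ tied.headD "" ++ ". "
    (response ++ "What made you feel that way? Please tell me in a few words.", true)

-- ===== PRECONDITION & SPEC =====
def Spec_respond_to_emotion (emotion_dict : List (String × Int)) (out : String × Bool) : Prop := out = respond_to_emotion_alt emotion_dict
instance (emotion_dict : List (String × Int)) (out : String × Bool) : Decidable (Spec_respond_to_emotion emotion_dict out) := by unfold Spec_respond_to_emotion; infer_instance

-- ===== CLAIM (what is proved, stated in full; the proofs are below) =====
def Claim_equal_respond_to_emotion : Prop := ∀ (emotion_dict : List (String × Int)), Dom_respond_to_emotion emotion_dict → Spec_respond_to_emotion emotion_dict (respond_to_emotion emotion_dict)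

-- ===== LEMMAS AND PROOFS =====

-- running maximum of the second components, seeded with b
def rteMax (b : Int) (xs : List (String × Int)) : Int := xs.foldl (fun m x => max m x.2) b

lemma le_rteMax (b : Int) (xs : List (String × Int)) : b ≤ rteMax b xs := by
  induction xs generalizing b with
  | nil => simp [rteMax]
  | cons x xs ih =>
    have := ih (max b x.2)
    simp only [rteMax, List.foldl_cons] at *
    omega

lemma mem_le_rteMax (b : Int) (xs : List (String × Int)) :
    ∀ y ∈ xs, y.2 ≤ rteMax b xs := by
  induction xs generalizing b with
  | nil => simp
  | cons x xs ih =>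
    intro y hy
    rcases List.mem_cons.mp hy with hy | hy
    · have := le_rteMax (max b x.2) xs
      simp only [hy, rteMax, List.foldl_cons] at *
      omega
    · exact ih (max b x.2) y hy

lemma rteMax_attained (b : Int) (xs : List (String × Int)) :
    rteMax b xs = b ∨ ∃ y ∈ xs, y.2 = rteMax b xs := by
  induction xs generalizing b with
  | nil => simp [rteMax]
  | cons x xs ih =>
    rcases ih (max b x.2) with h | ⟨y, hy, hy2⟩
    · simp only [rteMax, List.foldl_cons] at *
      rcases le_or_gt x.2 b with hb | hb
      · left; omega
      · right; exact ⟨x, List.mem_cons_self, by omega⟩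
    · right
      exact ⟨y, List.mem_cons_of_mem _ hy, by simpa [rteMax] using hy2⟩

-- B's loop, characterised: first component is the running max, second the names tied with it
lemma foldB_spec (xs : List (String × Int)) (b : Int) (tied : List String) :
    xs.foldl rteStep (some b, tied) =
      (some (rteMax b xs),
        (if rteMax b xs ≤ b then tied else []) ++
          (xs.filter (fun x => x.2 == rteMax b xs)).map (fun x => x.1)) := by
  induction xs generalizing b tied with
  | nil => simp [rteMax]
  | cons x xs ih =>
    have hM : rteMax b (x :: xs) = rteMax (max b x.2) xs := by simp [rteMax]
    have hbx : b ≤ rteMax b xs := le_rteMax b xs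
    rcases lt_trichotomy x.2 b with h | h | h
    · -- count < best: state unchanged, x filtered out
      have hmax : max b x.2 = b := by omega
      have hx : (x.2 == rteMax b xs) = false := by
        simp only [beq_eq_false_iff_ne]; intro hc; omega
      simp only [List.foldl_cons, rteStep]
      rw [if_neg (by omega), if_neg (by simp; omega), ih, hM, hmax]
      simp [hx]
    · -- count == best: name appended
      have hmax : max b x.2 = b := by omega
      simp only [List.foldl_cons, rteStep]
      rw [if_neg (by omega), if_pos (by simp [h]), ih, hM, hmax]
      rcases le_or_gt (rteMax b xs) b with hle | hgt
      · have hR : rteMax b xs = b := by omega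
        have hx : (x.2 == rteMax b xs) = true := by simp [h, hR]
        rw [if_pos hle, if_pos hle]
        simp [hx]
      · have hx : (x.2 == rteMax b xs) = false := by
          simp only [beq_eq_false_iff_ne]; intro hc; omega
        rw [if_neg (by omega), if_neg (by omega)]
        simp [hx]
    · -- count > best: reset
      have hmax : max b x.2 = x.2 := by omega
      have hge : x.2 ≤ rteMax x.2 xs := le_rteMax x.2 xs
      simp only [List.foldl_cons, rteStep]
      rw [if_pos (by omega), ih, hM, hmax]
      have hnb : ¬ (rteMax x.2 xs ≤ b) := by omega
      rcases le_or_gt (rteMax x.2 xs) x.2 with hle | hgt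
      · have hx : (x.2 == rteMax x.2 xs) = true := by simp; omega
        rw [if_pos hle, if_neg hnb]
        simp [hx]
      · have hx : (x.2 == rteMax x.2 xs) = false := by
          simp only [beq_eq_false_iff_ne]; intro hc; omega
        rw [if_neg (by omega), if_neg hnb]
        simp [hx]

-- inserting x (descending, stable) into a descending list: the elements with the maximal
-- key M keep their order, x landing last among them
lemma filter_insertBy (M : Int) (x : String × Int) (acc : List (String × Int))
    (hs : acc.Pairwise (fun a b => b.2 ≤ a.2)) (hx : x.2 ≤ M) (hacc : ∀ a ∈ acc, a.2 ≤ M) :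
    (PySem.List.insertBy (fun a b => decide (b.2 < a.2)) x acc).filter (fun a => a.2 == M)
      = if x.2 = M then acc.filter (fun a => a.2 == M) ++ [x]
        else acc.filter (fun a => a.2 == M) := by
  induction acc with
  | nil => simp [PySem.List.insertBy]; split <;> simp_all
  | cons a as ih =>
    by_cases hba : a.2 < x.2
    · have hall : ∀ y ∈ a :: as, ¬ (y.2 = M) := by
        intro y hy
        rcases List.mem_cons.mp hy with h | h
        · subst h; omega
        · have h1 := (List.pairwise_cons.mp hs).1 y h
          omega
      have hfilt : (a :: as).filter (fun a => a.2 == M) = [] := by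
        apply List.filter_eq_nil_iff.mpr
        intro y hy; simpa using hall y hy
      simp only [PySem.List.insertBy, hba, decide_true, if_true]
      by_cases hxm : x.2 = M
      · simp [hxm, hfilt]
      · simp only [List.filter_cons]
        rw [if_neg (by simpa using hxm)]
        simp [hxm]
    · have hs' := (List.pairwise_cons.mp hs).2
      have hacc' : ∀ y ∈ as, y.2 ≤ M := fun y hy => hacc y (List.mem_cons_of_mem _ hy)
      simp only [PySem.List.insertBy, show decide (a.2 < x.2) = false by simpa using hba,
        Bool.false_eq_true, if_false]
      simp only [List.filter_cons]
      rw [ih hs' hacc']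
      by_cases hxm : x.2 = M <;> by_cases ham : a.2 = M <;>
        simp [hxm, ham]

-- filtering the maximal-key elements out of the stable descending sort gives them in input order
lemma filter_sorted_rev (xs : List (String × Int)) (M : Int) (h : ∀ y ∈ xs, y.2 ≤ M) :
    (PySem.List.sorted xs (fun x => x.2) true).filter (fun a => a.2 == M)
      = xs.filter (fun a => a.2 == M) := by
  induction xs using List.reverseRecOn with
  | nil => simp [PySem.List.sorted]
  | append_singleton xs x ih =>
    have hxs : ∀ y ∈ xs, y.2 ≤ M := fun y hy => h y (List.mem_append_left _ hy)
    have hx : x.2 ≤ M := h x (List.mem_append_right _ List.mem_cons_self)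
    rw [PySem.List.sorted_rev_eq_foldl_insertBy, List.foldl_append, List.foldl_cons,
      List.foldl_nil, ← PySem.List.sorted_rev_eq_foldl_insertBy]
    rw [filter_insertBy M x _ (PySem.List.sorted_pairwise_rev xs (fun x => x.2)) hx
      (fun a ha => hxs a ((PySem.List.mem_sorted xs _ true a).mp ha))]
    rw [ih hxs, List.filter_append, List.filter_cons, List.filter_nil]
    by_cases hxm : x.2 = M <;> simp [hxm]

-- ===== VERDICT (by name: the statement is the Claim_ definition above) =====
theorem respond_to_emotion_spec : Claim_equal_respond_to_emotion := by
  intro emotion_dict _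
  unfold Spec_respond_to_emotion respond_to_emotion respond_to_emotion_alt
  set d := emotion_dict.filter (fun p => !(p.1 == "neutral")) with hd
  by_cases hnil : d = []
  · simp [hnil]
  · simp only [hnil, if_false]
    obtain ⟨x, xs, hcons⟩ := List.exists_cons_of_ne_nil hnil
    set M := rteMax x.2 xs with hMdef
    -- B's tied list
    have hfold : (d.foldl rteStep (none, [])).2
        = (d.filter (fun a => a.2 == M)).map (fun a => a.1) := by
      rw [hcons]
      simp only [List.foldl_cons, rteStep]
      rw [foldB_spec, ← hMdef]
      by_cases hle : M ≤ x.2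
      · have hx : (x.2 == M) = true := by
          simp only [beq_iff_eq]; exact le_antisymm (by rw [hMdef]; exact le_rteMax x.2 xs) hle
        rw [if_pos hle]
        simp [hx]
      · have hx : (x.2 == M) = false := by
          simp only [beq_eq_false_iff_ne]; intro hc; omega
        rw [if_neg hle]
        simp [hx]
    -- bound and attainment of M over d
    have hbound : ∀ y ∈ d, y.2 ≤ M := by
      intro y hy
      rw [hcons] at hy
      rcases List.mem_cons.mp hy with hy | hy
      · rw [hy]; exact le_rteMax x.2 xs
      · exact mem_le_rteMax x.2 xs y hy
    have hatt : ∃ y ∈ d, y.2 = M := by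
      rcases rteMax_attained x.2 xs with h | ⟨y, hy, hy2⟩
      · exact ⟨x, by rw [hcons]; exact List.mem_cons_self, by rw [hMdef, h]⟩
      · exact ⟨y, by rw [hcons]; exact List.mem_cons_of_mem _ hy, hy2⟩
    -- A's highest_freq is M
    obtain ⟨m, t, hsorted⟩ : ∃ m t, PySem.List.sorted d (fun x => x.2) true = m :: t := by
      rcases hexp : PySem.List.sorted d (fun x => x.2) true with _ | ⟨m, t⟩
      · exact absurd ((PySem.List.sorted_eq_nil_iff d _ true).mp hexp) hnil
      · exact ⟨m, t, rfl⟩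
    have hhf : (PySem.List.pyGetD (PySem.List.sorted d (fun x => x.2) true) 0 ("", 0)).2 = M := by
      rw [hsorted]
      have hub : m.2 ≤ M := hbound m ((PySem.List.mem_sorted d _ true m).mp (by rw [hsorted]; exact List.mem_cons_self))
      obtain ⟨y, hy, hy2⟩ := hatt
      have hlb : M ≤ m.2 := hy2 ▸ PySem.List.key_head_sorted_rev_ge d (fun x => x.2) hsorted y hy
      have : m.2 = M := le_antisymm hub hlb
      simpa [PySem.List.pyGetD, PySem.List.pyIdx?, PySem.List.pyGet?]
    rw [hhf, hfold, filter_sorted_rev d M hbound]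
    -- both branches now talk about the same filtered list
    set tf := d.filter (fun a => a.2 == M) with htf
    have htfne : tf ≠ [] := by
      obtain ⟨y, hy, hy2⟩ := hatt
      have : y ∈ tf := List.mem_filter.mpr ⟨hy, by simpa using hy2⟩
      exact List.ne_nil_of_mem this
    obtain ⟨z, zs, hz⟩ := List.exists_cons_of_ne_nil htfne
    by_cases hlen : tf.length > 1
    · simp [hlen]
    · simp only [List.length_map, hlen, if_false]
      rw [hz]
      simp [PySem.List.pyGetD, PySem.List.pyIdx?, PySem.List.pyGet?]
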